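-- pv_equiv track=rewrite | github.com/chhib/ai-hedge-fund | src/integrations/ibkr_client.py | _match_account
-- ===== SOURCE A (Python) =====
-- from typing import Any, Dict, Iterable, List, Optional
--
-- class IBKRError(RuntimeError):
--     """Raised when the Client Portal API responds with an error."""
--
-- def _match_account(preferred: str, account_index: Dict[str, Dict[str, Optional[str]]]) -> Optional[str]:
--     preferred_norm = preferred.strip().upper()
--     if not preferred_norm:
--         return None
--
--     for account_id in account_index:
--         if account_id.upper() == preferred_norm:
--             return account_id
--
--     exact_matches: List[str] = []
--     for account_id, info in account_index.items():
--         for value in info.values():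
--             if value and value.upper() == preferred_norm:
--                 exact_matches.append(account_id)
--                 break
--     if len(exact_matches) == 1:
--         return exact_matches[0]
--     if len(exact_matches) > 1:
--         raise IBKRError(f"Ambiguous IBKR account selector '{preferred}'. Matches: {', '.join(sorted(exact_matches))}")
--
--     partial_matches: List[str] = []
--     for account_id, info in account_index.items():
--         for value in info.values():
--             if value and preferred_norm in value.upper():
--                 partial_matches.append(account_id)
--                 break
--     if len(partial_matches) == 1:
--         return partial_matches[0]
--     if len(partial_matches) > 1:
--         raise IBKRError(f"Ambiguous IBKR account selector '{preferred}'. Matches: {', '.join(sorted(partial_matches))}")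
--
--     return None
-- ===== SOURCE B (Python) =====
-- from typing import Dict, List, Optional
--
-- class IBKRError(RuntimeError):
--     """Raised when the Client Portal API responds with an error."""
--
-- def _match_account(preferred: str, account_index: Dict[str, Dict[str, Optional[str]]]) -> Optional[str]:
--     preferred_norm = preferred.strip().upper()
--     if not preferred_norm:
--         return None
--
--     for account_id in account_index:
--         if account_id.upper() == preferred_norm:
--             return account_id
--
--     # Single pass: classify each account as an exact match, else a partial match.
--     exact: List[str] = []
--     partial: List[str] = []
--     for account_id, info in account_index.items():
--         values = [v.upper() for v in info.values() if v]
--         if any(v == preferred_norm for v in values):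
--             exact.append(account_id)
--         elif any(preferred_norm in v for v in values):
--             partial.append(account_id)
--
--     for bucket in (exact, partial):
--         if len(bucket) == 1:
--             return bucket[0]
--         if len(bucket) > 1:
--             raise IBKRError(f"Ambiguous IBKR account selector '{preferred}'. Matches: {', '.join(sorted(bucket))}")
--     return None
-- ===== Notes on version B (the rewrite author's own statement) =====
-- stated objective: alternative
-- what changed: B fuses A's two separate attribute scans (exact pass, then partial pass) into one classifying pass over account_index that puts each account into an 'exact' or 'partial' bucket (exact-first, computing the non-empty upper-cased values once per account), then resolves the buckets in order; Pre_ excludes only the ambiguous-selector inputs on which A raises IBKRError.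
import Mathlib
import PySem

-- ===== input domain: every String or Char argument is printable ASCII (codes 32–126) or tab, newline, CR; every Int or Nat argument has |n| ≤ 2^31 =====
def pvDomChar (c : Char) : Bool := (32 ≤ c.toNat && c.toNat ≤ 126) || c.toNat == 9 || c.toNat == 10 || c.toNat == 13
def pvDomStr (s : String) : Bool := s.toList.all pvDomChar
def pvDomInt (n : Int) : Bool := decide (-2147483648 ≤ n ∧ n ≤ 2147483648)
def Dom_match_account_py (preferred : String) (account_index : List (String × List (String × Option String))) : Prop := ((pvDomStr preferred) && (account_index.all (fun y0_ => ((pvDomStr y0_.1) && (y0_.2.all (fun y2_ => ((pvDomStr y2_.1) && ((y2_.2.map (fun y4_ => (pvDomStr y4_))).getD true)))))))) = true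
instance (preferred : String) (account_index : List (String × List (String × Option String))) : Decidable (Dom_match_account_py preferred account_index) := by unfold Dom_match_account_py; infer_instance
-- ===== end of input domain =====

-- B replaces A's two separate attribute scans with one classifying pass (exact-first buckets); same results, resolved in the original order.


-- ===== PORT A =====
-- 'if value and value.upper() == preferred_norm' (value : Optional[str]; truthy = some nonempty string)
def pvValExact (norm : String) (v : Option String) : Bool :=
  match v with
  | some s => (s != "") && (PySem.Str.upper s == norm)
  | none => false

-- 'if value and preferred_norm in value.upper()'
def pvValPartial (norm : String) (v : Option String) : Bool :=
  match v with
  | some s => (s != "") && PySem.Str.isIn norm (PySem.Str.upper s)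
  | none => false

-- literal port of A: normalize guard, id loop, then TWO scans (exact, then partial).
-- Where the Python raises IBKRError (an ambiguous bucket), the port returns none; those inputs are outside Pre_.
def match_account_py (preferred : String) (account_index : List (String × List (String × Option String))) : Option String :=
  let preferredNorm := PySem.Str.upper (PySem.Str.strip preferred)
  if preferredNorm == "" then none
  else
    match account_index.find? (fun p => PySem.Str.upper p.1 == preferredNorm) with
    | some p => some p.1
    | none =>
      let exactMatches := account_index.foldl
        (fun acc p => if p.2.any (fun kv => pvValExact preferredNorm kv.2) then acc ++ [p.1] else acc) []
      if exactMatches.length == 1 then exactMatches.head?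
      else if exactMatches.length > 1 then none  -- raise IBKRError (outside Pre_)
      else
        let partialMatches := account_index.foldl
          (fun acc p => if p.2.any (fun kv => pvValPartial preferredNorm kv.2) then acc ++ [p.1] else acc) []
        if partialMatches.length == 1 then partialMatches.head?
        else if partialMatches.length > 1 then none  -- raise IBKRError (outside Pre_)
        else none

-- ===== PORT B =====
-- literal port of Source B: one classifying pass building (exact, partial) buckets, then resolve the buckets in order.
def match_account_py_alt (preferred : String) (account_index : List (String × List (String × Option String))) : Option String :=
  let preferredNorm := PySem.Str.upper (PySem.Str.strip preferred)
  if preferredNorm == "" then none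
  else
    match account_index.find? (fun p => PySem.Str.upper p.1 == preferredNorm) with
    | some p => some p.1
    | none =>
      let buckets := account_index.foldl
        (fun (st : List String × List String) p =>
          let values := ((p.2.filterMap Prod.snd).filter (fun s => s != "")).map PySem.Str.upper
          if values.any (fun v => v == preferredNorm) then (st.1 ++ [p.1], st.2)
          else if values.any (fun v => PySem.Str.isIn preferredNorm v) then (st.1, st.2 ++ [p.1])
          else st) ([], [])
      -- 'for bucket in (exact, partial)': resolve exact first, then partial
      match buckets.1 with
      | [x] => some x
      | [] =>
        match buckets.2 with
        | [x] => some x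
        | [] => none
        | _ => none  -- raise IBKRError (outside Pre_)
      | _ => none  -- raise IBKRError (outside Pre_)

-- ===== PRECONDITION & SPEC =====
-- Pre_ excludes exactly the inputs on which Python A raises IBKRError: selector not trivially resolved and
-- more than one account in the decisive bucket (ambiguous exact matches, or no exact and ambiguous partial matches).
def Pre_match_account_py (preferred : String) (account_index : List (String × List (String × Option String))) : Prop :=
  let norm := PySem.Str.upper (PySem.Str.strip preferred)
  norm = "" ∨ (∃ p ∈ account_index, PySem.Str.upper p.1 = norm) ∨
    ((account_index.filter (fun p => p.2.any (fun kv => pvValExact norm kv.2))).length ≤ 1 ∧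
     ((account_index.filter (fun p => p.2.any (fun kv => pvValExact norm kv.2))).length = 0 →
      (account_index.filter (fun p => p.2.any (fun kv => pvValPartial norm kv.2))).length ≤ 1))
instance (preferred : String) (account_index : List (String × List (String × Option String))) : Decidable (Pre_match_account_py preferred account_index) := by unfold Pre_match_account_py; infer_instance

def pvWitness_match_account_py : String × (List (String × List (String × Option String))) :=
  ("u7", [("U7", [("name", some "Main")]), ("DU9", [("alias", some "u7x")])])

def Spec_match_account_py (preferred : String) (account_index : List (String × List (String × Option String))) (out : Option String) : Prop := out = match_account_py_alt preferred account_index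
instance (preferred : String) (account_index : List (String × List (String × Option String))) (out : Option String) : Decidable (Spec_match_account_py preferred account_index out) := by unfold Spec_match_account_py; infer_instance

-- ===== CLAIM (what is proved, stated in full; the proofs are below) =====
def Claim_equal_match_account_py : Prop := ∀ (preferred : String) (account_index : List (String × List (String × Option String))), Dom_match_account_py preferred account_index → Pre_match_account_py preferred account_index → Spec_match_account_py preferred account_index (match_account_py preferred account_index)

-- ===== LEMMAS AND PROOFS =====

-- B's per-account exact test (on the precomputed values list) equals A's per-value exact test.
theorem pvExact_test_eq (norm : String) (info : List (String × Option String)) :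
    (((info.filterMap Prod.snd).filter (fun s => s != "")).map PySem.Str.upper).any (fun v => v == norm)
      = info.any (fun kv => pvValExact norm kv.2) := by
  simp only [List.any_map, List.any_filter, List.any_filterMap]
  congr 1
  funext kv
  cases kv.2 <;> rfl

-- B's per-account partial test equals A's per-value partial test.
theorem pvPartial_test_eq (norm : String) (info : List (String × Option String)) :
    (((info.filterMap Prod.snd).filter (fun s => s != "")).map PySem.Str.upper).any (fun v => PySem.Str.isIn norm v)
      = info.any (fun kv => pvValPartial norm kv.2) := by
  simp only [List.any_map, List.any_filter, List.any_filterMap]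
  congr 1
  funext kv
  cases kv.2 <;> rfl

-- The classifying fold (with per-account tests already in A's form) is a pair of filters.
theorem pvFold2 (norm : String) (l : List (String × List (String × Option String))) (e pa : List String) :
    l.foldl
      (fun (st : List String × List String) p =>
        if p.2.any (fun kv => pvValExact norm kv.2) then (st.1 ++ [p.1], st.2)
        else if p.2.any (fun kv => pvValPartial norm kv.2) then (st.1, st.2 ++ [p.1])
        else st) (e, pa)
    = (e ++ (l.filter (fun p => p.2.any (fun kv => pvValExact norm kv.2))).map Prod.fst,
       pa ++ (l.filter (fun p => !(p.2.any (fun kv => pvValExact norm kv.2))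
                    && p.2.any (fun kv => pvValPartial norm kv.2))).map Prod.fst) := by
  induction l generalizing e pa with
  | nil => simp
  | cons p rest ih =>
    rw [List.foldl_cons]
    by_cases hx : p.2.any (fun kv => pvValExact norm kv.2)
    · simp only [hx, if_true]
      rw [ih]
      simp [hx]
    · simp only [hx, Bool.false_eq_true, if_false]
      by_cases hp : p.2.any (fun kv => pvValPartial norm kv.2)
      · simp only [hp, if_true]
        rw [ih]
        simp [hx, hp]
      · simp only [hp, Bool.false_eq_true, if_false]
        rw [ih]
        simp [hx, hp]

-- Resolving one bucket: A's if/else-on-length equals B's match (the >1 arm is the raise, none in both ports).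
theorem pvResolve (L : List String) (X : Option String) :
    (if L.length == 1 then L.head? else if L.length > 1 then none else X)
      = (match L with | [x] => some x | [] => X | _ => none) := by
  match L with
  | [] => rfl
  | [x] => rfl
  | x :: y :: t => simp

-- The ports agree on EVERY input (on the ambiguous inputs, where Python A raises, both ports return none).
theorem pv_ports_eq (preferred : String) (account_index : List (String × List (String × Option String))) :
    match_account_py preferred account_index = match_account_py_alt preferred account_index := by
  unfold match_account_py match_account_py_alt
  by_cases h0 : (PySem.Str.upper (PySem.Str.strip preferred) == "") = true
  · simp [h0]
  · simp only [h0, Bool.false_eq_true, if_false]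
    cases hf : account_index.find? (fun p => PySem.Str.upper p.1 == PySem.Str.upper (PySem.Str.strip preferred)) with
    | some p => rfl
    | none =>
      have hstep :
          (fun (st : List String × List String) (p : String × List (String × Option String)) =>
            let values := ((p.2.filterMap Prod.snd).filter (fun s => s != "")).map PySem.Str.upper
            if values.any (fun v => v == PySem.Str.upper (PySem.Str.strip preferred)) then (st.1 ++ [p.1], st.2)
            else if values.any (fun v => PySem.Str.isIn (PySem.Str.upper (PySem.Str.strip preferred)) v) then (st.1, st.2 ++ [p.1])
            else st)
          = (fun (st : List String × List String) p =>
            if p.2.any (fun kv => pvValExact (PySem.Str.upper (PySem.Str.strip preferred)) kv.2) then (st.1 ++ [p.1], st.2)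
            else if p.2.any (fun kv => pvValPartial (PySem.Str.upper (PySem.Str.strip preferred)) kv.2) then (st.1, st.2 ++ [p.1])
            else st) := by
        funext st p
        simp only [pvExact_test_eq, pvPartial_test_eq]
      simp only [hstep]
      rw [pvFold2]
      rw [PySem.List.foldl_append_if, PySem.List.foldl_append_if, pvResolve, pvResolve]
      simp only [List.nil_append]
      cases hEc : (account_index.filter (fun p => p.2.any (fun kv => pvValExact (PySem.Str.upper (PySem.Str.strip preferred)) kv.2))).map Prod.fst with
      | cons x t =>
        cases t with
        | nil => rfl
        | cons y t2 => rfl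
      | nil =>
        have hnone : account_index.filter (fun p => p.2.any (fun kv => pvValExact (PySem.Str.upper (PySem.Str.strip preferred)) kv.2)) = [] :=
          List.map_eq_nil_iff.mp hEc
        have hcong : account_index.filter (fun p => !(p.2.any (fun kv => pvValExact (PySem.Str.upper (PySem.Str.strip preferred)) kv.2))
                        && p.2.any (fun kv => pvValPartial (PySem.Str.upper (PySem.Str.strip preferred)) kv.2))
                   = account_index.filter (fun p => p.2.any (fun kv => pvValPartial (PySem.Str.upper (PySem.Str.strip preferred)) kv.2)) := by
          apply List.filter_congr
          intro p hp
          have hxf : (p.2.any (fun kv => pvValExact (PySem.Str.upper (PySem.Str.strip preferred)) kv.2)) = false := by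
            by_contra hc
            have hmem : p ∈ account_index.filter (fun p => p.2.any (fun kv => pvValExact (PySem.Str.upper (PySem.Str.strip preferred)) kv.2)) := by
              rw [List.mem_filter]
              exact ⟨hp, by simpa using hc⟩
            rw [hnone] at hmem
            exact absurd hmem (List.not_mem_nil)
          simp [hxf]
        rw [hcong]

-- ===== VERDICT (by name: the statement is the Claim_ definition above) =====
theorem match_account_py_spec : Claim_equal_match_account_py := by
  intro preferred account_index _ _
  unfold Spec_match_account_py
  exact pv_ports_eq preferred account_index
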